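-- pv_equiv track=rewrite | github.com/mathelai/github.io | imo2017p5/simulation.py | greedy_selection
-- ===== SOURCE A (Python) =====
-- from typing import List, Tuple, Optional, Dict, Set
--
-- def greedy_selection(heights: List[int], n: int) -> Optional[List[int]]:
--     """
--     Greedy algorithm: Select 2N players using a constructive approach.
--
--     Strategy: Build pairs from tallest to shortest, ensuring each pair is adjacent
--     in the final selection.
--     """
--     num_players = len(heights)
--
--     # Create a list of (height, original_position) tuples
--     indexed_heights = [(heights[i], i) for i in range(num_players)]
--     indexed_heights.sort(reverse=True)  # Sort by height (tallest first)
--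
--     selected_positions = []
--
--     # We need to select 2N players forming N pairs
--     # Each pair should be adjacent in position among selected players
--
--     # Try to build pairs greedily
--     for pair_idx in range(n):
--         # Get the next two tallest unselected players
--         candidates = [x for x in indexed_heights if x[1] not in selected_positions]
--
--         if len(candidates) < 2:
--             return None
--
--         # Take the two tallest remaining
--         height1, pos1 = candidates[0]
--         height2, pos2 = candidates[1]
--
--         # Add them to selected positions
--         selected_positions.extend([pos1, pos2])
--
--     return sorted(selected_positions)
-- ===== SOURCE B (Python) =====
-- def greedy_selection(heights, n):
--     if n <= 0:
--         return []
--     if len(heights) < 2 * n: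
--         return None
--     order = sorted(range(len(heights)), key=lambda i: (-heights[i], -i))
--     return sorted(order[:2 * n])
-- ===== Notes on version B (the rewrite author's own statement) =====
-- stated objective: faster
-- what changed: A rescans and re-filters the whole sorted list against the growing selected-positions list for each of the N pairs (quadratic-plus rescan per pair); B sorts the indices once by (-height, -index) and takes the first 2N directly, after a single length check.
import Mathlib
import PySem

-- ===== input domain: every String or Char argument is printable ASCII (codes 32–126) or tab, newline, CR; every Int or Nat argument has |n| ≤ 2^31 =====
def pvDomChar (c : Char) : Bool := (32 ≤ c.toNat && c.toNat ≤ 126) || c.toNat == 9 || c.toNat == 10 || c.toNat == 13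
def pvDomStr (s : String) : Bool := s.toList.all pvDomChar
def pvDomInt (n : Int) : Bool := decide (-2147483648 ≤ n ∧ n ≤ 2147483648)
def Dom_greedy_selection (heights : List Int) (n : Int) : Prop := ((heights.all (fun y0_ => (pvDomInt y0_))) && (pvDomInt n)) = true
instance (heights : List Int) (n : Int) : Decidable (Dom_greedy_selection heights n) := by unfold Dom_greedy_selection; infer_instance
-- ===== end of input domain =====

-- B replaces A's quadratic per-pair rescan of unselected players by one sort: take the first 2N
-- indices of the height-sorted order directly (objective: faster).

-- ===== PORT A =====
-- the 'for pair_idx in range(n)' loop: each round filters out already-selected positions,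
-- takes the two tallest remaining, or returns None when fewer than 2 candidates remain
def pvLoopA (sortedH : List (Int × Int)) : Nat → List Int → Option (List Int)
  | 0, sel => some (PySem.List.sorted sel (fun x => x) false)
  | k+1, sel =>
    match sortedH.filter (fun x => !(sel.contains x.2)) with
    | c1 :: c2 :: _ => pvLoopA sortedH k (sel ++ [c1.2, c2.2])
    | _ => none

def greedy_selection (heights : List Int) (n : Int) : Option (List Int) :=
  let numPlayers := heights.length
  let indexed := (List.range numPlayers).map (fun i : Nat => (PySem.List.pyGetD heights (i : Int) 0, (i : Int)))
  let sortedH := PySem.List.sorted2 indexed (fun x => x.1) (fun x => x.2) true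
  pvLoopA sortedH n.toNat []

-- ===== PORT B =====
def greedy_selection_alt (heights : List Int) (n : Int) : Option (List Int) :=
  if n ≤ 0 then some []
  else if (heights.length : Int) < 2 * n then none
  else
    let order := PySem.List.sorted2 ((List.range heights.length).map (fun i : Nat => (i : Int)))
        (fun i => -(PySem.List.pyGetD heights i 0)) (fun i => -i) false
    some (PySem.List.sorted (order.take (2 * n).toNat) (fun x => x) false)

-- ===== PRECONDITION & SPEC =====
def Spec_greedy_selection (heights : List Int) (n : Int) (out : Option (List Int)) : Prop := out = greedy_selection_alt heights n
instance (heights : List Int) (n : Int) (out : Option (List Int)) : Decidable (Spec_greedy_selection heights n out) := by unfold Spec_greedy_selection; infer_instance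

-- ===== CLAIM (what is proved, stated in full; the proofs are below) =====
def Claim_equal_greedy_selection : Prop := ∀ (heights : List Int) (n : Int), Dom_greedy_selection heights n → Spec_greedy_selection heights n (greedy_selection heights n)

-- ===== LEMMAS AND PROOFS =====

-- a Python tuple sort (sorted2) is a sort by the lexicographic key
theorem pv_lex_bool (p q r s : Int) :
    (decide (p < q) || (!decide (q < p) && decide (r < s))) = decide (toLex (p, r) < toLex (q, s)) := by
  by_cases h1 : p < q <;> by_cases h2 : q < p <;> by_cases h3 : r < s <;>
    simp [h1, h2, h3, Prod.Lex.toLex_lt_toLex] <;> omega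

theorem pv_sorted2_eq_sorted {α : Type} (xs : List α) (k1 k2 : α → Int) (rev : Bool) :
    PySem.List.sorted2 xs k1 k2 rev =
      PySem.List.sorted xs (fun x => toLex (k1 x, k2 x)) rev := by
  unfold PySem.List.sorted2 PySem.List.sorted
  cases rev <;> simp only [if_true, if_false, Bool.false_eq_true, pv_lex_bool]

-- filtering out the positions of the first t entries of a snd-Nodup list leaves exactly the tail
theorem pv_filter_append (u v : List (Int × Int))
    (h : ((u ++ v).map (·.2)).Nodup) :
    (u ++ v).filter (fun x => !((u.map (·.2)).contains x.2)) = v := by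
  rw [List.map_append, List.nodup_append] at h
  rw [List.filter_append]
  have h1 : u.filter (fun x => !((u.map (·.2)).contains x.2)) = [] := by
    rw [List.filter_eq_nil_iff]
    intro x hx
    simp only [Bool.not_eq_true', List.contains_eq_mem, decide_eq_false_iff_not, not_not]
    exact List.mem_map.mpr ⟨x, hx, rfl⟩
  have h2 : v.filter (fun x => !((u.map (·.2)).contains x.2)) = v := by
    rw [List.filter_eq_self]
    intro x hx
    simp only [Bool.not_eq_true', List.contains_eq_mem, decide_eq_false_iff_not]
    intro hmem
    exact h.2.2 _ hmem _ (List.mem_map.mpr ⟨x, hx, rfl⟩) rfl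
  rw [h1, h2, List.nil_append]

theorem pv_filter_drop (l : List (Int × Int)) (t : Nat)
    (hnd : (l.map (·.2)).Nodup) :
    l.filter (fun x => !(((l.take t).map (·.2)).contains x.2)) = l.drop t := by
  have h := pv_filter_append (l.take t) (l.drop t) (by rw [List.take_append_drop]; exact hnd)
  rw [List.take_append_drop] at h
  exact h

-- the loop invariant: selected = positions of the 2j tallest, as a prefix of the sorted list
theorem pvLoopA_spec (S : List (Int × Int)) (hnd : (S.map (·.2)).Nodup) :
    ∀ (k j : Nat), 2*j ≤ S.length →
      pvLoopA S k ((S.take (2*j)).map (·.2)) =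
        (if 2*j + 2*k ≤ S.length then
          some (PySem.List.sorted ((S.take (2*j + 2*k)).map (·.2)) (fun x => x) false)
        else none) := by
  intro k
  induction k with
  | zero =>
    intro j hj
    simp [pvLoopA, hj]
  | succ k ih =>
    intro j hj
    rw [pvLoopA]
    rw [pv_filter_drop S (2*j) hnd]
    by_cases hfit : 2*j + 2 ≤ S.length
    · have h0 : 2*j < S.length := by omega
      have h1 : 2*j + 1 < S.length := by omega
      have hdrop : S.drop (2*j) = S[2*j] :: S[2*j+1] :: S.drop (2*j+2) := by
        rw [List.drop_eq_getElem_cons h0, List.drop_eq_getElem_cons h1]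
      rw [hdrop]
      have hsel : (S.take (2*j)).map (·.2) ++ [(S[2*j]).2, (S[2*j+1]).2]
          = (S.take (2*(j+1))).map (·.2) := by
        have e1 : S.take (2*(j+1)) = S.take (2*j) ++ [S[2*j]] ++ [S[2*j+1]] := by
          have a1 : S.take (2*j+1) = S.take (2*j) ++ [S[2*j]] := by
            rw [List.take_add_one, List.getElem?_eq_getElem h0]; rfl
          have a2 : S.take (2*j+2) = S.take (2*j+1) ++ [S[2*j+1]] := by
            rw [List.take_add_one, List.getElem?_eq_getElem h1]; rfl
          have : 2*(j+1) = 2*j+2 := by omega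
          rw [this, a2, a1]
        rw [e1, List.map_append, List.map_append]
        simp only [List.map_cons, List.map_nil, List.append_assoc, List.cons_append,
          List.nil_append]
      show pvLoopA S k ((S.take (2*j)).map (·.2) ++ [(S[2*j]).2, (S[2*j+1]).2]) = _
      rw [hsel, ih (j+1) (by omega)]
      have harith : 2*(j+1) + 2*k = 2*j + 2*(k+1) := by omega
      rw [harith]
    · have hlen : (S.drop (2*j)).length < 2 := by
        rw [List.length_drop]; omega
      have hcond : ¬ (2*j + 2*(k+1) ≤ S.length) := by omega
      rw [if_neg hcond]
      rcases hd : S.drop (2*j) with _ | ⟨x, _ | ⟨y, tl⟩⟩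
      · rfl
      · rfl
      · rw [hd] at hlen; simp at hlen

-- abbreviation (proof-side only): A's height-sorted list of (height, position) pairs
def pvS (heights : List Int) : List (Int × Int) :=
  PySem.List.sorted2
    ((List.range heights.length).map (fun i : Nat => (PySem.List.pyGetD heights (i : Int) 0, (i : Int))))
    (fun x => x.1) (fun x => x.2) true

theorem pv_S_perm (heights : List Int) :
    (pvS heights).Perm
      ((List.range heights.length).map (fun i : Nat => (PySem.List.pyGetD heights (i : Int) 0, (i : Int)))) := by
  rw [pvS, pv_sorted2_eq_sorted]
  exact PySem.List.sorted_perm _ _ _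

theorem pv_S_snd_nodup (heights : List Int) :
    ((pvS heights).map (·.2)).Nodup := by
  rw [((pv_S_perm heights).map (·.2)).nodup_iff]
  rw [List.map_map]
  have he : ((fun x : Int × Int => x.2) ∘ fun i : Nat => (PySem.List.pyGetD heights (i : Int) 0, (i : Int)))
      = (fun i : Nat => (i : Int)) := rfl
  rw [he]
  exact List.Nodup.map (fun a b h => Int.natCast_inj.mp h) List.nodup_range

theorem pv_S_length (heights : List Int) : (pvS heights).length = heights.length := by
  rw [(pv_S_perm heights).length_eq, List.length_map, List.length_range]

-- closed form of port A
theorem pv_greedy_selection_eq (heights : List Int) (n : Int) :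
    greedy_selection heights n =
      (if 2*n.toNat ≤ (pvS heights).length then
        some (PySem.List.sorted (((pvS heights).take (2*n.toNat)).map (·.2)) (fun x => x) false)
      else none) := by
  have h := pvLoopA_spec (pvS heights) (pv_S_snd_nodup heights) n.toNat 0 (by omega)
  simp only [Nat.mul_zero, List.take_zero, List.map_nil, Nat.zero_add] at h
  exact h

-- B's sorted index order is exactly the positions of A's height-sorted pair list
theorem pv_order_eq (heights : List Int) :
    PySem.List.sorted2 ((List.range heights.length).map (fun i : Nat => (i : Int)))
        (fun i => -(PySem.List.pyGetD heights i 0)) (fun i => -i) false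
      = (pvS heights).map (·.2) := by
  rw [pv_sorted2_eq_sorted]
  apply PySem.List.sorted_eq_of_perm_of_pairwise_lt
  · -- permutation
    have h1 := (pv_S_perm heights).map (·.2)
    have he : (((List.range heights.length).map
        (fun i : Nat => (PySem.List.pyGetD heights (i : Int) 0, (i : Int)))).map (·.2))
        = (List.range heights.length).map (fun i : Nat => (i : Int)) := by
      rw [List.map_map]; rfl
    rw [he] at h1
    exact h1
  · -- strictly increasing under B's key
    have hmem : ∀ x ∈ pvS heights, PySem.List.pyGetD heights x.2 0 = x.1 := by
      intro x hx
      have hx' := (pv_S_perm heights).mem_iff.mp hx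
      rcases List.mem_map.mp hx' with ⟨i, _, rfl⟩
      rfl
    have hle : (pvS heights).Pairwise (fun a b => toLex (b.1, b.2) ≤ toLex (a.1, a.2)) := by
      rw [pvS, pv_sorted2_eq_sorted]
      exact PySem.List.sorted_pairwise_rev _ _
    have hnd : (pvS heights).Nodup := (pv_S_snd_nodup heights).of_map
    have hlt : (pvS heights).Pairwise (fun a b => toLex (b.1, b.2) < toLex (a.1, a.2)) := by
      refine (hle.and hnd).imp ?_
      rintro a b ⟨h1, h2⟩
      refine lt_of_le_of_ne h1 (fun hEq => h2 ?_)
      have h3 : (b.1, b.2) = (a.1, a.2) := toLex.injective hEq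
      cases a; cases b; simp_all
    rw [List.pairwise_map]
    refine hlt.imp_of_mem ?_
    intro a b ha hb h
    have hga := hmem a ha
    have hgb := hmem b hb
    rw [hga, hgb]
    rw [Prod.Lex.toLex_lt_toLex] at h ⊢
    simp only at h ⊢
    omega

-- ===== VERDICT (by name: the statement is the Claim_ definition above) =====
theorem greedy_selection_spec : Claim_equal_greedy_selection := by
  intro heights n _
  unfold Spec_greedy_selection greedy_selection_alt
  rw [show greedy_selection heights n =
      (if 2*n.toNat ≤ (pvS heights).length then
        some (PySem.List.sorted (((pvS heights).take (2*n.toNat)).map (·.2)) (fun x => x) false)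
      else none) from pv_greedy_selection_eq heights n]
  rw [pv_order_eq]
  by_cases hn : n ≤ 0
  · rw [if_pos hn]
    have h0 : n.toNat = 0 := by omega
    rw [h0]
    simp [PySem.List.sorted]
  · rw [if_neg hn]
    have hSlen := pv_S_length heights
    by_cases hlen : (heights.length : Int) < 2 * n
    · rw [if_pos hlen, if_neg (by omega)]
    · rw [if_neg hlen, if_pos (by omega)]
      have ht : (2 * n).toNat = 2 * n.toNat := by omega
      rw [ht, List.map_take]
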